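-- pv_equiv track=rewrite | github.com/pk4727/Machine_Learning_Model | Log Analysis/Log Analysis Assignment.py | count_requests_per_ip
-- ===== SOURCE A (Python) =====
-- def count_requests_per_ip(logs):
--     ip_counts = {}                      # Dictionary to store IP addresses and their request counts.
--     for log in logs:                    # Iterate through each log entry.
--         ip = log.split(' ')[0]          # The IP address is the first part of the log.
--         if ip in ip_counts:
--             ip_counts[ip] += 1          # Increment the count if the IP address already exists in the dictionary.
--         else:
--             ip_counts[ip] = 1           # Add the IP address to the dictionary with an initial count of 1.
--     return ip_counts
-- ===== SOURCE B (Python) =====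
-- def count_requests_per_ip(logs):
--     ips = [log.split(' ')[0] for log in logs]
--     s = sorted(ips)
--     counts = {}
--     i = 0
--     while i < len(s):
--         j = i + 1
--         while j < len(s) and s[j] == s[i]:
--             j += 1
--         counts[s[i]] = j - i          # length of the run of equal IPs
--         i = j
--     return {ip: counts.get(ip, 0) for ip in dict.fromkeys(ips)}
-- ===== Notes on version B (the rewrite author's own statement) =====
-- stated objective: alternative
-- what changed: Replaces the one-pass dict-increment loop by sort-then-scan: extract all IPs, sort them, count contiguous runs with a two-pointer scan, and emit the counts in first-occurrence order via dict.fromkeys.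
import Mathlib
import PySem

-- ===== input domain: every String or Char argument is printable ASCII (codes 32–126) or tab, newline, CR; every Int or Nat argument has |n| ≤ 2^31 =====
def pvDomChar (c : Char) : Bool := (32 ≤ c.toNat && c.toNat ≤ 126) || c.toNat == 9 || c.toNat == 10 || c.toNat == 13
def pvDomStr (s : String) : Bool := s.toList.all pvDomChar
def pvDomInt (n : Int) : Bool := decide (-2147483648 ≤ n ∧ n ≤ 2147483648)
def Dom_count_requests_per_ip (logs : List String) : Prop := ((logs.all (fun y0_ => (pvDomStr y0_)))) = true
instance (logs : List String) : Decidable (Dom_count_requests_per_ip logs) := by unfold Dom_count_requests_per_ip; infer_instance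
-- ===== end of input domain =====

-- B replaces A's one-pass dict-increment loop by sort-then-scan run counting (alternative decomposition, same result).


-- ===== PORT A =====
-- log.split(' ')[0]: splitting on a nonempty separator always yields a nonempty list,
-- so Python's [0] never raises; headD's default is unreachable.
def pvFirstField (log : String) : String := ((PySem.Str.split? log " ").getD []).headD ""

def count_requests_per_ip (logs : List String) : List (String × Int) :=
  (logs.foldl (fun d log =>
      if d.contains (pvFirstField log) then
        d.insert (pvFirstField log) (d.getD (pvFirstField log) 0 + 1)  -- ip_counts[ip] += 1
      else d.insert (pvFirstField log) 1)                              -- ip_counts[ip] = 1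
    PySem.Dict.empty).items

-- ===== PORT B =====
-- inner 'while j < len(s) and s[j] == s[i]' loop: returns the final j
def pvScanJ (s : List String) (x : String) (j : Nat) : Nat :=
  if h : j < s.length then
    if s[j] = x then pvScanJ s x (j + 1) else j
  else j
termination_by s.length - j

lemma pvScanJ_ge (s : List String) (x : String) (j : Nat) : j ≤ pvScanJ s x j := by
  unfold pvScanJ
  split
  · split
    · exact le_trans (Nat.le_succ j) (pvScanJ_ge s x (j + 1))
    · exact le_refl j
  · exact le_refl j
termination_by s.length - j

-- outer 'while i < len(s)' loop: builds the counts dict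
def pvOuter (s : List String) (counts : PySem.Dict String Int) (i : Nat) : PySem.Dict String Int :=
  if h : i < s.length then
    let j := pvScanJ s s[i] (i + 1)
    pvOuter s (counts.insert s[i] ((j : Int) - (i : Int))) j
  else counts
termination_by s.length - i
decreasing_by have := pvScanJ_ge s s[i] (i + 1); omega

def count_requests_per_ip_alt (logs : List String) : List (String × Int) :=
  let ips := logs.map pvFirstField
  let s := PySem.List.sorted ips (fun x => x) false
  let counts := pvOuter s PySem.Dict.empty 0
  (PySem.List.dedup ips).map (fun ip => (ip, counts.getD ip 0))  -- counts.get(ip, 0); key always present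

-- ===== PRECONDITION & SPEC =====
def Spec_count_requests_per_ip (logs : List String) (out : List (String × Int)) : Prop := out = count_requests_per_ip_alt logs
instance (logs : List String) (out : List (String × Int)) : Decidable (Spec_count_requests_per_ip logs out) := by unfold Spec_count_requests_per_ip; infer_instance

-- ===== CLAIM (what is proved, stated in full; the proofs are below) =====
def Claim_equal_count_requests_per_ip : Prop := ∀ (logs : List String), Dom_count_requests_per_ip logs → Spec_count_requests_per_ip logs (count_requests_per_ip logs)

-- ===== LEMMAS AND PROOFS =====
-- A's loop body is the standard counter step: when the key is absent, getD gives 0, so both branches insert getD+1.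
lemma pv_step_eq (d : PySem.Dict String Int) (ip : String) :
    (if d.contains ip then d.insert ip (d.getD ip 0 + 1) else d.insert ip 1)
      = d.insert ip (d.getD ip 0 + 1) := by
  by_cases h : d.contains ip = true
  · simp [h]
  · have h' : d.contains ip = false := by simpa using h
    simp [h', PySem.Dict.getD_of_not_contains d 0 h']

lemma pvScanJ_le (s : List String) (x : String) (j : Nat) (hj : j ≤ s.length) :
    pvScanJ s x j ≤ s.length := by
  unfold pvScanJ
  split
  · split
    · exact pvScanJ_le s x (j + 1) (by omega)
    · exact hj
  · exact hj
termination_by s.length - j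

lemma pvScanJ_run (s : List String) (x : String) (j : Nat) :
    ∀ m (hm : m < s.length), j ≤ m → m < pvScanJ s x j → s[m] = x := by
  intro m hm h1 h2
  unfold pvScanJ at h2
  split at h2
  · split at h2
    · rcases Nat.eq_or_lt_of_le h1 with h | h
      · subst h; assumption
      · exact pvScanJ_run s x (j + 1) m hm h h2
    · omega
  · omega
termination_by s.length - j

lemma pvScanJ_stop (s : List String) (x : String) (j : Nat)
    (h : pvScanJ s x j < s.length) : s[pvScanJ s x j] ≠ x := by
  by_cases hj : j < s.length
  · by_cases hx : s[j] = x
    · have he : pvScanJ s x j = pvScanJ s x (j + 1) := by rw [pvScanJ]; simp [hj, hx]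
      simp only [he] at h ⊢
      exact pvScanJ_stop s x (j + 1) h
    · have he : pvScanJ s x j = j := by rw [pvScanJ]; simp [hj, hx]
      simp only [he]
      exact hx
  · have he : pvScanJ s x j = j := by rw [pvScanJ]; simp [hj]
    exact absurd (he ▸ h) hj
termination_by s.length - j

-- the run decomposition: drop i = replicate (j-i) x ++ drop j
lemma pv_drop_run (s : List String) (i j : Nat) (x : String)
    (hij : i ≤ j) (hjl : j ≤ s.length)
    (hrun : ∀ m (hm : m < s.length), i ≤ m → m < j → s[m] = x) :
    s.drop i = List.replicate (j - i) x ++ s.drop j := by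
  apply List.ext_getElem
  · simp [List.length_drop, List.length_replicate]; omega
  · intro n h1 h2
    rw [List.getElem_drop]
    by_cases hn : n < j - i
    · rw [List.getElem_append_left (by simpa [List.length_replicate] using hn),
        List.getElem_replicate]
      exact hrun (i + n) (by omega) (by omega) (by omega)
    · rw [List.getElem_append_right (by simpa [List.length_replicate] using hn)]
      simp only [List.length_replicate, List.getElem_drop]
      congr 1; omega

-- x does not occur at or after position j (s sorted ≤, s[j] ≠ x, x = s[i] with i < j)
lemma pv_not_mem_drop (s : List String) (hs : s.Pairwise (· ≤ ·)) (i j : Nat)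
    (hi : i < s.length) (hij : i < j) (hjl : j ≤ s.length)
    (hstop : ∀ (h : j < s.length), s[j] ≠ s[i]) :
    s[i] ∉ s.drop j := by
  intro hmem
  rw [List.mem_iff_getElem] at hmem
  obtain ⟨t, ht, heq⟩ := hmem
  have hd : (s.drop j).length = s.length - j := List.length_drop
  have hjt : j + t < s.length := by omega
  rw [List.getElem_drop] at heq
  have hjlt : j < s.length := by omega
  have hij' : s[i] ≤ s[j] := List.pairwise_iff_getElem.mp hs i j hi hjlt hij
  have hjm : s[j] ≤ s[j + t] := by
    rcases Nat.eq_or_lt_of_le (Nat.le_add_right j t) with h | h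
    · simp [← h]
    · exact List.pairwise_iff_getElem.mp hs j (j + t) hjlt (by omega) h
  exact hstop hjlt (le_antisymm (heq ▸ hjm) hij')

-- main invariant of the outer loop on a sorted list
lemma pvOuter_getD (s : List String) (hs : s.Pairwise (· ≤ ·)) :
    ∀ i (counts : PySem.Dict String Int) (k : String),
      (pvOuter s counts i).getD k 0
        = if k ∈ s.drop i then ((s.drop i).count k : Int) else counts.getD k 0 := by
  intro i counts k
  unfold pvOuter
  split
  · rename_i h
    have hge := pvScanJ_ge s s[i] (i + 1)
    have hle := pvScanJ_le s s[i] (i + 1) (by omega)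
    set j := pvScanJ s s[i] (i + 1) with hj
    have hrun : ∀ m (hm : m < s.length), i ≤ m → m < j → s[m] = s[i] := by
      intro m hm h1 h2
      rcases Nat.eq_or_lt_of_le h1 with h' | h'
      · simp [← h']
      · exact pvScanJ_run s s[i] (i + 1) m hm h' h2
    have hdec : s.drop i = List.replicate (j - i) s[i] ++ s.drop j :=
      pv_drop_run s i j s[i] (by omega) hle hrun
    have hnot : s[i] ∉ s.drop j :=
      pv_not_mem_drop s hs i j h (by omega) hle (fun hjlt => pvScanJ_stop s s[i] (i + 1) hjlt)
    have hIH := pvOuter_getD s hs j (counts.insert s[i] ((j : Int) - (i : Int))) k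
    rw [hIH]
    by_cases hk : k ∈ s.drop j
    · have hkx : k ≠ s[i] := fun he => hnot (he ▸ hk)
      have hk' : k ∈ s.drop i := by rw [hdec]; exact List.mem_append_right _ hk
      rw [if_pos hk, if_pos hk']
      rw [hdec, List.count_append, List.count_replicate,
        if_neg (by simpa using fun he => hkx he.symm)]
      simp
    · rw [if_neg hk]
      by_cases hkx : k = s[i]
      · have hk' : k ∈ s.drop i := by
          rw [hdec, hkx]
          exact List.mem_append_left _ (List.mem_replicate.mpr ⟨by omega, rfl⟩)
        rw [if_pos hk', hkx, PySem.Dict.getD_insert_self]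
        rw [hdec, List.count_append, List.count_replicate, if_pos (by simp),
          List.count_eq_zero_of_not_mem (hkx ▸ hk)]
        push_cast
        omega
      · have hk' : k ∉ s.drop i := by
          rw [hdec]
          simp only [List.mem_append, List.mem_replicate]
          rintro (⟨-, h'⟩ | h')
          · exact hkx h'
          · exact hk h'
        rw [if_neg hk', PySem.Dict.getD_insert_of_ne _ _ _ hkx]
  · rename_i h
    have hnil : s.drop i = [] := List.drop_eq_nil_of_le (by omega)
    simp [hnil]
termination_by i => s.length - i
decreasing_by have := pvScanJ_ge s s[i] (i + 1); omega

-- ===== VERDICT (by name: the statement is the Claim_ definition above) =====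
theorem count_requests_per_ip_spec : Claim_equal_count_requests_per_ip := by
  intro logs _
  unfold Spec_count_requests_per_ip count_requests_per_ip count_requests_per_ip_alt
  have h1 : (fun (d : PySem.Dict String Int) (log : String) =>
        if d.contains (pvFirstField log) then
          d.insert (pvFirstField log) (d.getD (pvFirstField log) 0 + 1)
        else d.insert (pvFirstField log) 1)
      = fun d log => d.insert (pvFirstField log) (d.getD (pvFirstField log) 0 + 1) :=
    funext fun d => funext fun log => pv_step_eq d (pvFirstField log)
  rw [h1, ← List.foldl_map (f := pvFirstField)
        (g := fun (d : PySem.Dict String Int) ip => d.insert ip (d.getD ip 0 + 1)),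
      PySem.Dict.foldl_insert_getD_add_one_eq_counter, PySem.Dict.items_counter]
  set ips := logs.map pvFirstField with hips
  set s := PySem.List.sorted ips (fun x => x) false with hsdef
  have hperm : s.Perm ips := PySem.List.sorted_perm ips (fun x => x) false
  have hs : s.Pairwise (· ≤ ·) := PySem.List.sorted_pairwise ips (fun x => x)
  rw [← PySem.List.dedup_eq_ofList]
  apply List.map_congr_left
  intro k hk
  have hk' : k ∈ ips := (PySem.List.mem_dedup ips k).mp hk
  have hks : k ∈ s := hperm.mem_iff.mpr hk'
  have := pvOuter_getD s hs 0 PySem.Dict.empty k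
  simp only [List.drop_zero, if_pos hks] at this
  rw [this, hperm.count_eq]
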